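-- pv_equiv track=rewrite | github.com/xiuhei/interview | scripts/build_runtime_corpus.py | coverage_matrix
-- ===== SOURCE A (Python) =====
-- from collections import Counter, defaultdict
--
-- def coverage_matrix(records: list[dict]) -> dict[str, dict[str, int]]:
--     matrix: defaultdict[str, Counter] = defaultdict(Counter)
--     for record in records:
--         matrix[str(record.get("role_code") or "unknown")][str(record.get("doc_type") or "unknown")] += 1
--     return {
--         role: dict(sorted(counter.items()))
--         for role, counter in sorted(matrix.items())
--     }
-- ===== SOURCE B (Python) =====
-- def coverage_matrix(records: list[dict]) -> dict[str, dict[str, int]]: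
--     keys = sorted((str(r.get("role_code") or "unknown"), str(r.get("doc_type") or "unknown"))
--                   for r in records)
--
--     def inner(ks):
--         # ks is lex-sorted and all pairs share one role: peel off the leading
--         # run of equal doc_types; its length is that doc_type's count.
--         if not ks:
--             return {}
--         dt = ks[0][1]
--         i = 0
--         while i < len(ks) and ks[i][1] == dt:
--             i += 1
--         return {dt: i, **inner(ks[i:])}
--
--     def build(ks):
--         # ks is lex-sorted: peel off the leading block of one role.
--         if not ks:
--             return {}
--         role = ks[0][0]
--         i = 0
--         while i < len(ks) and ks[i][0] == role:
--             i += 1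
--         return {role: inner(ks[:i]), **build(ks[i:])}
--
--     return build(keys)
-- ===== Notes on version B (the rewrite author's own statement) =====
-- stated objective: alternative
-- what changed: Instead of incrementally tallying in a defaultdict-of-Counters and sorting each level afterwards, B sorts the flat list of normalized (role, doc_type) key pairs once and then builds the nested dicts directly by recursively peeling off maximal runs (a role block, then doc_type runs inside it), the run length being the count - no counting container is maintained.
import Mathlib
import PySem

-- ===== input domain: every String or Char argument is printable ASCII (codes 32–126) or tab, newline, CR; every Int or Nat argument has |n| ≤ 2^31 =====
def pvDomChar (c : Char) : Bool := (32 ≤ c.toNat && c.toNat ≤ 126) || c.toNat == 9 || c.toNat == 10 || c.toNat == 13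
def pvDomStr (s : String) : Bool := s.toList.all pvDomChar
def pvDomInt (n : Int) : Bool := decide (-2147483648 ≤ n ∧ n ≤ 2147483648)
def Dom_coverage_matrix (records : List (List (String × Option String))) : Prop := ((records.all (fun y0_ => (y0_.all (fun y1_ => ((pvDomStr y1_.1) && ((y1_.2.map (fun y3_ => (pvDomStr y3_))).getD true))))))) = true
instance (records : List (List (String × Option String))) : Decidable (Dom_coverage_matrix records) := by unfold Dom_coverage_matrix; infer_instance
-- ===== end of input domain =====

-- B replaces A's incrementally tallied defaultdict-of-Counters (each level sorted afterwards)
-- by sorting the flat list of normalized key pairs once and recursively peeling sorted runs,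
-- the run length being the count — an alternative algorithm of similar cost.

-- str(record.get(k) or "unknown"): missing key, None value and "" all normalize to "unknown".
def pvNorm (record : List (String × Option String)) (k : String) : String :=
  match record.lookup k with
  | some (some s) => if s == "" then "unknown" else s
  | _ => "unknown"

-- ===== PORT A =====
-- sorted(matrix.items()) / sorted(counter.items()): dict keys are distinct, so Python's tuple
-- comparison is decided by the first component — ported as sorting with key = fst.
def coverage_matrix (records : List (List (String × Option String))) : List (String × List (String × Int)) :=
  let matrix : PySem.Dict String (PySem.Dict String Int) :=
    records.foldl (fun m r =>
      m.modify (pvNorm r "role_code") PySem.Dict.empty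
        (fun inner => inner.modify (pvNorm r "doc_type") 0 (fun c => c + 1)))
      PySem.Dict.empty
  (PySem.List.sorted matrix.items (fun p => p.1)).map
    (fun p => (p.1, PySem.List.sorted p.2.items (fun q => q.1)))

-- ===== PORT B =====
-- the termination measure of the run-peeling recursions (cited by decreasing_by)
theorem pv_dropWhile_lt {α : Type} (p : α → Bool) (k : α) (t : List α) (h : p k = true) :
    ((k :: t).dropWhile p).length < (k :: t).length := by
  rw [List.dropWhile_cons_of_pos h]
  exact Nat.lt_succ_of_le (List.length_dropWhile_le p t)

-- inner(ks): the while loop finds the boundary i of the leading doc_type run;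
-- ks[:i] / ks[i:] at that boundary are takeWhile / dropWhile of the run predicate.
def pvInner : List (String × String) → List (String × Int)
  | [] => []
  | k :: t =>
    (k.2, (((k :: t).takeWhile (fun q => q.2 == k.2)).length : Int)) ::
      pvInner ((k :: t).dropWhile (fun q => q.2 == k.2))
termination_by ks => ks.length
decreasing_by exact pv_dropWhile_lt _ k t (by simp)

-- build(ks): same splitting on the leading role block
def pvBuild : List (String × String) → List (String × List (String × Int))
  | [] => []
  | k :: t =>
    (k.1, pvInner ((k :: t).takeWhile (fun q => q.1 == k.1))) ::
      pvBuild ((k :: t).dropWhile (fun q => q.1 == k.1))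
termination_by ks => ks.length
decreasing_by exact pv_dropWhile_lt _ k t (by simp)

-- sorted(list of pairs): Python compares tuples lexicographically = key (fst, snd)
def coverage_matrix_alt (records : List (List (String × Option String))) : List (String × List (String × Int)) :=
  pvBuild (PySem.List.sorted2
    (records.map (fun r => (pvNorm r "role_code", pvNorm r "doc_type")))
    (fun p => p.1) (fun p => p.2))

-- ===== PRECONDITION & SPEC =====
def Spec_coverage_matrix (records : List (List (String × Option String))) (out : List (String × List (String × Int))) : Prop := out = coverage_matrix_alt records
instance (records : List (List (String × Option String))) (out : List (String × List (String × Int))) : Decidable (Spec_coverage_matrix records out) := by unfold Spec_coverage_matrix; infer_instance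

-- ===== CLAIM (what is proved, stated in full; the proofs are below) =====
def Claim_equal_coverage_matrix : Prop := ∀ (records : List (List (String × Option String))), Dom_coverage_matrix records → Spec_coverage_matrix records (coverage_matrix records)

-- ===== LEMMAS AND PROOFS =====

-- the common normal form both ports are reduced to
def pvCanon (ks : List (String × String)) : List (String × List (String × Int)) :=
  (PySem.List.sorted (PySem.Set.ofList (ks.map (fun k => k.1))) (fun x => x)).map
    (fun role =>
      (role,
        (PySem.List.sorted
            (PySem.Set.ofList ((ks.filter (fun k => k.1 == role)).map (fun k => k.2)))
            (fun x => x)).map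
          (fun dt => (dt, (ks.count (role, dt) : Int)))))

-- ---- A-side: the fold of nested Dict.modify is pvCanon ----

-- A's outer fold, projected at one role, is the inner counting fold over that role's pairs
theorem pv_getD_fold (ks : List (String × String)) (m : PySem.Dict String (PySem.Dict String Int))
    (r : String) :
    (ks.foldl (fun m k =>
        m.modify k.1 PySem.Dict.empty (fun inner => inner.modify k.2 0 (fun c => c + 1))) m).getD
        r PySem.Dict.empty
      = ((ks.filter (fun k => k.1 == r)).map (fun k => k.2)).foldl
          (fun d x => d.modify x 0 (fun c => c + 1)) (m.getD r PySem.Dict.empty) := by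
  induction ks generalizing m with
  | nil => simp
  | cons k ks ih =>
    simp only [List.foldl_cons, List.filter_cons]
    by_cases h : k.1 = r
    · simp only [h, beq_self_eq_true, if_pos, List.map_cons, List.foldl_cons, ih]
      congr 1
      simp [PySem.Dict.getD_modify_self]
    · have hb : (k.1 == r) = false := beq_eq_false_iff_ne.mpr h
      simp only [hb, if_neg Bool.false_ne_true, ih]
      congr 1
      exact PySem.Dict.getD_modify_of_ne _ _ _ (Ne.symm h)

-- counting a doc_type among one role's pairs is counting the pair in the full key list
theorem pv_count_snd (ks : List (String × String)) (r d : String) :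
    ((ks.filter (fun k => k.1 == r)).map (fun k => k.2)).count d = ks.count (r, d) := by
  induction ks with
  | nil => rfl
  | cons k ks ih =>
    rcases k with ⟨a, b⟩
    by_cases ha : a = r
    · subst ha
      by_cases hd : b = d <;>
        simp [ih, hd, Prod.ext_iff]
    · simp [beq_eq_false_iff_ne.mpr ha, ih, Prod.ext_iff, ha]

-- sorting key/value pairs over a distinct key set by fst = mapping over the sorted key set
theorem pv_sorted_map_pairs {ν : Type} (xs : List String) (g : String → ν) :
    PySem.List.sorted ((PySem.Set.ofList xs).map (fun k => (k, g k))) (fun p => p.1)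
      = (PySem.List.sorted (PySem.Set.ofList xs) (fun x => x)).map (fun k => (k, g k)) := by
  apply PySem.List.sorted_eq_of_perm_of_pairwise_lt
  · exact List.Perm.map _ (PySem.List.sorted_perm _ _ _)
  · exact List.Pairwise.map _ (fun a b h => h) (PySem.List.sorted_ofList_pairwise_lt xs)

-- the A side, phrased over the normalized key-pair list
theorem pv_main (ks : List (String × String)) :
    (PySem.List.sorted (ks.foldl (fun m k =>
        m.modify k.1 PySem.Dict.empty (fun inner => inner.modify k.2 0 (fun c => c + 1)))
        PySem.Dict.empty).items (fun p => p.1)).map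
        (fun p => (p.1, PySem.List.sorted p.2.items (fun q => q.1)))
      = pvCanon ks := by
  simp only [pvCanon]
  set matrix : PySem.Dict String (PySem.Dict String Int) := ks.foldl (fun m k =>
      m.modify k.1 PySem.Dict.empty (fun inner => inner.modify k.2 0 (fun c => c + 1)))
      PySem.Dict.empty with hm
  have hnd : matrix.keys.Nodup := by
    rw [hm]
    exact PySem.Dict.nodup_keys_foldl_modify_key ks (fun k => k.1) PySem.Dict.empty
      (fun _ k => fun inner : PySem.Dict String Int => inner.modify k.2 0 (fun c => c + 1)) PySem.Dict.empty (by simp)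
  have hkeys : matrix.keys = PySem.Set.ofList (ks.map (fun k => k.1)) := by
    rw [hm]
    have := PySem.Dict.keys_foldl_modify_key ks (fun k => k.1) PySem.Dict.empty
      (fun _ k => fun inner : PySem.Dict String Int => inner.modify k.2 0 (fun c => c + 1)) PySem.Dict.empty
    simpa [PySem.Set.update_nil_left] using this
  have hitems : matrix.items
      = (PySem.Set.ofList (ks.map (fun k => k.1))).map
          (fun k => (k, matrix.getD k PySem.Dict.empty)) := by
    rw [← hkeys]; exact PySem.Dict.items_eq_map_keys matrix hnd PySem.Dict.empty
  rw [hitems, pv_sorted_map_pairs, List.map_map]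
  apply List.map_congr_left
  intro r _
  simp only [Function.comp]
  congr 1
  have hinner : matrix.getD r PySem.Dict.empty
      = PySem.Dict.counter ((ks.filter (fun k => k.1 == r)).map (fun k => k.2)) := by
    rw [hm, pv_getD_fold, PySem.Dict.counter_eq_foldl]
    simp
  rw [hinner, PySem.Dict.items_counter, pv_sorted_map_pairs]
  apply List.map_congr_left
  intro d _
  simp [pv_count_snd]

-- ---- B-side: peeling runs of the lex-sorted key list is pvCanon ----

-- sorted2 with keys (fst, snd) is sorting by the lexicographic order on the pair
theorem pv_sorted2_lex (xs : List (String × String)) :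
    PySem.List.sorted2 xs (fun p => p.1) (fun p => p.2)
      = PySem.List.sorted xs (fun p => (toLex p : Lex (String × String))) := by
  simp only [PySem.List.sorted2, PySem.List.sorted]
  congr 1
  funext acc x
  congr 1
  funext a b
  by_cases h1 : a.1 < b.1
  · simp [h1, Prod.Lex.lt_iff]
  · by_cases h2 : b.1 < a.1
    · have hne : a.1 ≠ b.1 := fun h => absurd (h ▸ h2) (lt_irrefl _)
      simp [h1, h2, Prod.Lex.lt_iff, hne]
    · have heq : a.1 = b.1 := le_antisymm (le_of_not_gt h2) (le_of_not_gt h1)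
      by_cases h3 : a.2 < b.2 <;> simp [h3, Prod.Lex.lt_iff, heq]

-- on a list sorted by f whose head key is minimal, the leading run of key r is the whole
-- filter, and everything after it has key strictly above r
theorem pv_split (f : String × String → String) (r : String) :
    ∀ (S : List (String × String)), S.Pairwise (fun a b => f a ≤ f b) → (∀ x ∈ S, r ≤ f x) →
      S.takeWhile (fun q => f q == r) = S.filter (fun q => f q == r) ∧
      ∀ x ∈ S.dropWhile (fun q => f q == r), r < f x := by
  intro S
  induction S with
  | nil => simp
  | cons x xs ih =>
    intro hpw hge
    obtain ⟨hx, hxs⟩ := List.pairwise_cons.mp hpw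
    by_cases hxr : f x = r
    · have hb : (f x == r) = true := beq_iff_eq.mpr hxr
      obtain ⟨ih1, ih2⟩ := ih hxs (fun y hy => hxr ▸ hx y hy)
      refine ⟨?_, ?_⟩
      · simp only [List.takeWhile_cons, List.filter_cons, hb, if_pos, ih1]
      · simp only [List.dropWhile_cons, hb, if_pos]
        exact ih2
    · have hb : (f x == r) = false := beq_eq_false_iff_ne.mpr hxr
      have hlt : r < f x := lt_of_le_of_ne (hge x (List.mem_cons_self)) (Ne.symm hxr)
      refine ⟨?_, ?_⟩
      · simp only [List.takeWhile_cons, List.filter_cons, hb, if_neg Bool.false_ne_true]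
        symm
        rw [List.filter_eq_nil_iff]
        intro y hy
        have : r < f y := lt_of_lt_of_le hlt (hx y hy)
        simp only [beq_iff_eq]
        exact ne_of_gt this
      · simp only [List.dropWhile_cons, hb, if_neg Bool.false_ne_true]
        intro y hy
        rcases List.mem_cons.mp hy with h | h
        · exact h ▸ hlt
        · exact lt_of_lt_of_le hlt (hx y h)

-- sorted(set) of a block-of-r followed by strictly-larger keys peels off r
theorem pv_sorted_set_cons (f : String × String → String) (r : String)
    (B R : List (String × String)) (hB : r ∈ B.map f) (hBf : ∀ x ∈ B, f x = r)
    (hR : ∀ x ∈ R, r < f x) :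
    PySem.List.sorted (PySem.Set.ofList ((B ++ R).map f)) (fun x => x)
      = r :: PySem.List.sorted (PySem.Set.ofList (R.map f)) (fun x => x) := by
  have hmemR : ∀ y, y ∈ PySem.List.sorted (PySem.Set.ofList (R.map f)) (fun x => x) ↔ y ∈ R.map f := by
    intro y
    rw [PySem.List.mem_sorted, PySem.Set.mem_ofList]
  have hrnot : r ∉ PySem.List.sorted (PySem.Set.ofList (R.map f)) (fun x => x) := by
    rw [hmemR]
    intro hmem
    obtain ⟨x, hx, hfx⟩ := List.mem_map.mp hmem
    exact absurd (hfx ▸ hR x hx) (lt_irrefl r)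
  apply PySem.List.sorted_eq_of_perm_of_pairwise_lt
  · rw [List.perm_ext_iff_of_nodup]
    · intro y
      rw [List.mem_cons, hmemR, PySem.Set.mem_ofList, List.map_append, List.mem_append]
      constructor
      · rintro (h | h)
        · exact Or.inl (h ▸ hB)
        · exact Or.inr h
      · rintro (h | h)
        · left
          obtain ⟨x, hx, hfx⟩ := List.mem_map.mp h
          rw [← hfx, hBf x hx]
        · exact Or.inr h
    · exact List.nodup_cons.mpr
        ⟨hrnot, (PySem.List.sorted_perm _ _ _).nodup_iff.mpr (PySem.Set.nodup_ofList _)⟩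
    · exact PySem.Set.nodup_ofList _
  · refine List.Pairwise.cons ?_ (PySem.List.sorted_ofList_pairwise_lt _)
    intro y hy
    obtain ⟨x, hx, hfx⟩ := List.mem_map.mp ((hmemR y).mp hy)
    exact hfx ▸ hR x hx

-- inner run-peeling on one role's block is the sorted-set-with-counts form
theorem pv_inner_canon (r : String) :
    ∀ (B : List (String × String)), (∀ x ∈ B, x.1 = r) → B.Pairwise (fun a b => a.2 ≤ b.2) →
      pvInner B = (PySem.List.sorted (PySem.Set.ofList (B.map (fun k => k.2))) (fun x => x)).map
          (fun d => (d, (B.count (r, d) : Int))) := by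
  intro B
  induction B using pvInner.induct with
  | case1 =>
    intro _ _
    rw [pvInner]
    rfl
  | case2 k t ih =>
    intro hall hpw
    obtain ⟨hk, hpt⟩ := List.pairwise_cons.mp hpw
    have hge : ∀ x ∈ k :: t, k.2 ≤ x.2 := by
      intro x hx
      rcases List.mem_cons.mp hx with h | h
      · exact h ▸ le_refl _
      · exact hk x h
    obtain ⟨htw0, hdw0⟩ := pv_split (fun q => q.2) k.2 (k :: t) hpw hge
    have htw : (k :: t).takeWhile (fun q => q.2 == k.2) = (k :: t).filter (fun q => q.2 == k.2) := htw0
    have hdw : ∀ x ∈ (k :: t).dropWhile (fun q => q.2 == k.2), k.2 < x.2 := hdw0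
    set run := (k :: t).takeWhile (fun q => q.2 == k.2) with hrun
    set rest := (k :: t).dropWhile (fun q => q.2 == k.2) with hrest
    have hsplit : run ++ rest = k :: t := List.takeWhile_append_dropWhile
    have hrun_snd : ∀ x ∈ run, x.2 = k.2 := by
      intro x hx
      rw [hrun] at hx
      exact beq_iff_eq.mp (List.mem_takeWhile_imp (p := fun q : String × String => q.2 == k.2) hx)
    have hrun_mem : ∀ x ∈ run, x ∈ k :: t := fun x hx => (List.takeWhile_sublist _).subset hx
    have hkrun : k ∈ run := by
      rw [hrun, List.takeWhile_cons_of_pos (by simp)]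
      exact List.mem_cons_self
    have hsetcons := pv_sorted_set_cons (fun q => q.2) k.2 run rest
      (List.mem_map_of_mem hkrun) hrun_snd hdw
    rw [hsplit] at hsetcons
    have hcnt_head : (k :: t).count (r, k.2) = run.length := by
      rw [← hsplit, List.count_append]
      have h1 : run.count (r, k.2) = run.length := by
        rw [List.count_eq_length]
        intro b hb
        have h2 := hrun_snd b hb
        have h3 := hall b (hrun_mem b hb)
        exact Prod.ext h3.symm h2.symm
      have h2 : rest.count (r, k.2) = 0 := by
        rw [List.count_eq_zero]
        intro hmem
        exact absurd (hdw (r, k.2) hmem) (lt_irrefl _)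
      rw [h1, h2, Nat.add_zero]
    have hall_rest : ∀ x ∈ rest, x.1 = r := fun x hx => hall x ((List.dropWhile_sublist _).subset hx)
    have hpw_rest : rest.Pairwise (fun a b => a.2 ≤ b.2) := hpw.sublist (List.dropWhile_sublist _)
    rw [pvInner, hsetcons, List.map_cons, ← hrun, ← hrest, ih hall_rest hpw_rest, hcnt_head]
    congr 1
    apply List.map_congr_left
    intro d hd
    have hdm : d ∈ rest.map (fun k => k.2) := (PySem.Set.mem_ofList _ _).mp ((PySem.List.mem_sorted _ _ _ _).mp hd)
    obtain ⟨x, hx, hfx⟩ := List.mem_map.mp hdm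
    have hklt : k.2 < d := hfx ▸ hdw x hx
    have : (k :: t).count (r, d) = rest.count (r, d) := by
      rw [← hsplit, List.count_append]
      have h0 : run.count (r, d) = 0 := by
        rw [List.count_eq_zero]
        intro hmem
        exact absurd (hrun_snd (r, d) hmem) (ne_of_gt hklt)
      rw [h0, Nat.zero_add]
    rw [this]

-- outer run-peeling of a lex-sorted list is pvCanon
theorem pv_build_canon :
    ∀ (S : List (String × String)),
      S.Pairwise (fun a b => (toLex a : Lex (String × String)) ≤ toLex b) →
      pvBuild S = pvCanon S := by
  intro S
  induction S using pvBuild.induct with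
  | case1 =>
    intro _
    rw [pvBuild, pvCanon]
    rfl
  | case2 k t ih =>
    intro hpw
    have hfst_of_lex : ∀ {a b : String × String},
        (toLex a : Lex (String × String)) ≤ toLex b → a.1 ≤ b.1 := by
      intro a b h
      rcases Prod.Lex.le_iff.mp h with h | ⟨h, _⟩
      · exact le_of_lt h
      · exact le_of_eq h
    have hpw_fst : (k :: t).Pairwise (fun a b => a.1 ≤ b.1) :=
      hpw.imp (fun h => hfst_of_lex h)
    obtain ⟨hk, hpt⟩ := List.pairwise_cons.mp hpw_fst
    have hge : ∀ x ∈ k :: t, k.1 ≤ x.1 := by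
      intro x hx
      rcases List.mem_cons.mp hx with h | h
      · exact h ▸ le_refl _
      · exact hk x h
    obtain ⟨htw0, hdw0⟩ := pv_split (fun q => q.1) k.1 (k :: t) hpw_fst hge
    have htw : (k :: t).takeWhile (fun q => q.1 == k.1) = (k :: t).filter (fun q => q.1 == k.1) := htw0
    have hdw : ∀ x ∈ (k :: t).dropWhile (fun q => q.1 == k.1), k.1 < x.1 := hdw0
    set block := (k :: t).takeWhile (fun q => q.1 == k.1) with hblock
    set rest := (k :: t).dropWhile (fun q => q.1 == k.1) with hrest
    have hsplit : block ++ rest = k :: t := List.takeWhile_append_dropWhile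
    have hblock_fst : ∀ x ∈ block, x.1 = k.1 := by
      intro x hx
      rw [hblock] at hx
      exact beq_iff_eq.mp (List.mem_takeWhile_imp (p := fun q : String × String => q.1 == k.1) hx)
    have hkblock : k ∈ block := by
      rw [hblock, List.takeWhile_cons_of_pos (by simp)]
      exact List.mem_cons_self
    have hsetcons := pv_sorted_set_cons (fun q => q.1) k.1 block rest
      (List.mem_map_of_mem hkblock) hblock_fst hdw
    rw [hsplit] at hsetcons
    -- the block is sorted by snd
    have hpw_block : block.Pairwise (fun a b => a.2 ≤ b.2) := by
      refine List.Pairwise.imp_of_mem ?_ ((hpw.sublist (List.takeWhile_sublist _)))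
      intro a b ha hb hab
      rcases Prod.Lex.le_iff.mp hab with h | ⟨_, h⟩
      · exfalso
        simp only [ofLex_toLex] at h
        rw [hblock_fst a ha, hblock_fst b hb] at h
        exact lt_irrefl _ h
      · exact h
    -- block counts are whole-list counts for role k.1
    have hcnt_block : ∀ d : String, block.count (k.1, d) = (k :: t).count (k.1, d) := by
      intro d
      rw [← hsplit, List.count_append]
      have h0 : rest.count (k.1, d) = 0 := by
        rw [List.count_eq_zero]
        intro hmem
        exact absurd (hdw (k.1, d) hmem) (lt_irrefl _)
      rw [h0, Nat.add_zero]
    have hpw_rest : rest.Pairwise (fun a b => (toLex a : Lex (String × String)) ≤ toLex b) :=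
      hpw.sublist (List.dropWhile_sublist _)
    rw [pvBuild, pvCanon, hsetcons, List.map_cons, ← hblock, ← hrest]
    congr 1
    · -- head: role k.1
      congr 1
      rw [← htw, pv_inner_canon k.1 block hblock_fst hpw_block]
      apply List.map_congr_left
      intro d _
      rw [hcnt_block]
    · -- tail: roles strictly above k.1
      rw [ih hpw_rest, pvCanon]
      apply List.map_congr_left
      intro role hrole
      have hrm : role ∈ rest.map (fun q => q.1) :=
        (PySem.Set.mem_ofList _ _).mp ((PySem.List.mem_sorted _ _ _ _).mp hrole)
      obtain ⟨x, hx, hfx⟩ := List.mem_map.mp hrm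
      have hklt : k.1 < role := hfx ▸ hdw x hx
      have hfilter : (k :: t).filter (fun q => q.1 == role) = rest.filter (fun q => q.1 == role) := by
        rw [← hsplit, List.filter_append]
        have h0 : block.filter (fun q => q.1 == role) = [] := by
          rw [List.filter_eq_nil_iff]
          intro y hy
          simp only [beq_iff_eq]
          exact (hblock_fst y hy).symm ▸ ne_of_lt hklt
        rw [h0, List.nil_append]
      have hcnt : ∀ d : String, (k :: t).count (role, d) = rest.count (role, d) := by
        intro d
        rw [← hsplit, List.count_append]
        have h0 : block.count (role, d) = 0 := by
          rw [List.count_eq_zero]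
          intro hmem
          exact absurd (hblock_fst (role, d) hmem) (ne_of_gt hklt)
        rw [h0, Nat.zero_add]
      rw [hfilter]
      congr 1
      apply List.map_congr_left
      intro d _
      rw [hcnt]

-- permutations of the key list have the same pvCanon
theorem pv_ofList_perm {α : Type} [BEq α] [LawfulBEq α] {l₁ l₂ : List α} (h : l₁.Perm l₂) :
    (PySem.Set.ofList l₁).Perm (PySem.Set.ofList l₂) := by
  rw [List.perm_ext_iff_of_nodup (PySem.Set.nodup_ofList _) (PySem.Set.nodup_ofList _)]
  intro a
  rw [PySem.Set.mem_ofList, PySem.Set.mem_ofList]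
  exact h.mem_iff

theorem pv_canon_perm {S T : List (String × String)} (h : S.Perm T) : pvCanon S = pvCanon T := by
  simp only [pvCanon]
  rw [(PySem.List.sorted_id_eq_sorted_id_iff_perm _ _).mpr (pv_ofList_perm (h.map _))]
  apply List.map_congr_left
  intro r _
  congr 1
  rw [(PySem.List.sorted_id_eq_sorted_id_iff_perm _ _).mpr (pv_ofList_perm ((h.filter _).map _))]
  apply List.map_congr_left
  intro d _
  rw [h.count_eq]

-- ===== VERDICT (by name: the statement is the Claim_ definition above) =====
theorem coverage_matrix_spec : Claim_equal_coverage_matrix := by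
  intro records _
  show coverage_matrix records = coverage_matrix_alt records
  have hA := pv_main (records.map (fun r => (pvNorm r "role_code", pvNorm r "doc_type")))
  rw [List.foldl_map] at hA
  simp only [coverage_matrix, coverage_matrix_alt]
  rw [pv_sorted2_lex, pv_build_canon _ (PySem.List.sorted_pairwise _ _),
    pv_canon_perm (PySem.List.sorted_perm _ _ _)]
  simpa using hA
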